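-- pv_equiv track=rewrite | github.com/itschurry/wealth-pulse | analyzer/recommendation_engine.py | _keyword_hits
-- ===== SOURCE A (Python) =====
-- from typing import Dict, List
--
-- def _keyword_hits(chunks: List[str], keywords: List[str]) -> int:
--     if not chunks:
--         return 0
--     hits = 0
--     for kw in keywords:
--         kw_l = kw.lower()
--         if any(kw_l in c for c in chunks):
--             hits += 1
--     return hits
-- ===== SOURCE B (Python) =====
-- def _keyword_hits(chunks, keywords):
--     lowered = [kw.lower() for kw in keywords]
--     found = [False] * len(keywords)
--     for c in chunks:
--         for i, kw in enumerate(lowered):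
--             if not found[i] and kw in c:
--                 found[i] = True
--     return sum(found)
-- ===== Notes on version B (the rewrite author's own statement) =====
-- stated objective: alternative
-- what changed: Inverts the loop nesting: B scans chunks in the outer loop and maintains a per-keyword boolean completion table (set at most once per keyword), instead of A's per-keyword any() scan over all chunks; the lowering of keywords is hoisted out of the chunk loop.
import Mathlib
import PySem

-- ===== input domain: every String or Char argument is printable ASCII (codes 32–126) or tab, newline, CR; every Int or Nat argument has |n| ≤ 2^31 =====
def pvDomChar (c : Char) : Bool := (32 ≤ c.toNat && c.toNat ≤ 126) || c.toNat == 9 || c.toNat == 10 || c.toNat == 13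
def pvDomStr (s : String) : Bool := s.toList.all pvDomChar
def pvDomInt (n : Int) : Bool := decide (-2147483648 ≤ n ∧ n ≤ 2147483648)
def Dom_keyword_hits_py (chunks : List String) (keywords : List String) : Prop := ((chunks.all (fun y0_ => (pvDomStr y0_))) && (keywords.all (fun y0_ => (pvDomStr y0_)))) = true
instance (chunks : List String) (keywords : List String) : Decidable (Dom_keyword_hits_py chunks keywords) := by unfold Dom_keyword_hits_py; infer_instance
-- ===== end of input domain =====

-- B inverts the loop nesting: outer loop over chunks maintaining a per-keyword boolean
-- completion table, instead of A's per-keyword any() scan over all chunks (alternative, same cost).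


-- ===== PORT A =====
-- literal port of A: early return on empty chunks, then for each keyword an any() scan over chunks
def keyword_hits_py (chunks : List String) (keywords : List String) : Int :=
  if chunks = [] then 0
  else
    keywords.foldl
      (fun hits kw =>
        if chunks.any (fun c => PySem.Str.isIn (PySem.Str.lower kw) c) then hits + 1 else hits)
      0

-- ===== PORT B =====
-- one pass of the inner keyword table over one chunk (B's inner 'for i, kw in enumerate(lowered)')

def keyword_hits_py_alt (chunks : List String) (keywords : List String) : Int :=
  let lowered := keywords.map PySem.Str.lower
  let found :=
    chunks.foldl
      (fun found c =>
        List.zipWith (fun f kw => if !f && PySem.Str.isIn kw c then true else f) found lowered)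
      (List.replicate keywords.length false)
  ((found.count true : Nat) : Int)

-- ===== PRECONDITION & SPEC =====
def Spec_keyword_hits_py (chunks : List String) (keywords : List String) (out : Int) : Prop := out = keyword_hits_py_alt chunks keywords
instance (chunks : List String) (keywords : List String) (out : Int) : Decidable (Spec_keyword_hits_py chunks keywords out) := by unfold Spec_keyword_hits_py; infer_instance

-- ===== CLAIM (what is proved, stated in full; the proofs are below) =====
def Claim_equal_keyword_hits_py : Prop := ∀ (chunks : List String) (keywords : List String), Dom_keyword_hits_py chunks keywords → Spec_keyword_hits_py chunks keywords (keyword_hits_py chunks keywords)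

-- ===== LEMMAS AND PROOFS =====

-- composing two same-second-argument zipWiths
theorem zipWith_zipWith_same {α β γ δ : Type} (g : α → β → γ) (h : γ → β → δ)
    (as : List α) : ∀ (bs : List β),
    List.zipWith h (List.zipWith g as bs) bs = List.zipWith (fun a b => h (g a b) b) as bs := by
  induction as with
  | nil => intro bs; simp
  | cons a as ih => intro bs; cases bs <;> simp [ih]

theorem zipWith_fst {α β : Type} (as : List α) : ∀ (bs : List β), as.length = bs.length →
    List.zipWith (fun a _ => a) as bs = as := by
  induction as with
  | nil => intro bs _; simp
  | cons a as ih => intro bs h; cases bs with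
    | nil => simp at h
    | cons b bs => simp_all

theorem bool_step (f x y : Bool) :
    ((if (!f && x) = true then true else f) || y) = (f || (x || y)) := by
  cases f <;> cases x <;> cases y <;> rfl

-- the found-table fold computed pointwise: final flag i = initial flag i || (some chunk contains kw i)
theorem fold_found (chunks : List String) (lowered : List String) :
    ∀ (found : List Bool), found.length = lowered.length →
    chunks.foldl
      (fun found c =>
        List.zipWith (fun f kw => if !f && PySem.Str.isIn kw c then true else f) found lowered)
      found
    = List.zipWith (fun f kw => f || chunks.any (fun c => PySem.Str.isIn kw c)) found lowered := by
  induction chunks with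
  | nil =>
    intro found h
    simp only [List.foldl_nil, List.any_nil, Bool.or_false]
    exact (zipWith_fst found lowered h).symm
  | cons c cs ih =>
    intro found h
    have hlen : (List.zipWith (fun f kw => if !f && PySem.Str.isIn kw c then true else f)
        found lowered).length = lowered.length := by simp [h]
    simp only [List.foldl_cons, ih _ hlen, zipWith_zipWith_same, List.any_cons]
    simp only [bool_step]

theorem zipWith_replicate_or {p : String → Bool} (l : List String) :
    List.zipWith (fun f kw => f || p kw) (List.replicate l.length false) l = l.map p := by
  induction l with
  | nil => rfl
  | cons x xs ih => simp [List.replicate_succ, ih]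

theorem count_true_map (p : String → Bool) (l : List String) :
    (l.map p).count true = l.countP p := by
  induction l with
  | nil => rfl
  | cons x xs ih => cases hx : p x <;> simp [hx, ih]

-- ===== VERDICT (by name: the statement is the Claim_ definition above) =====
theorem keyword_hits_py_spec : Claim_equal_keyword_hits_py := by
  intro chunks keywords _
  unfold Spec_keyword_hits_py keyword_hits_py keyword_hits_py_alt
  have hB :
      ((chunks.foldl
        (fun found c =>
          List.zipWith (fun f kw => if !f && PySem.Str.isIn kw c then true else f) found
            (keywords.map PySem.Str.lower))
        (List.replicate keywords.length false)).count true : Int)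
      = (keywords.countP (fun kw => chunks.any (fun c => PySem.Str.isIn (PySem.Str.lower kw) c)) : Int) := by
    rw [fold_found chunks (keywords.map PySem.Str.lower) _ (by simp)]
    have : keywords.length = (keywords.map PySem.Str.lower).length := by simp
    rw [this, zipWith_replicate_or, count_true_map, List.countP_map]
    rfl
  split_ifs with h
  · subst h
    simp [List.count_replicate]
  · rw [PySem.List.foldl_count_if
      (fun kw => chunks.any (fun c => PySem.Str.isIn (PySem.Str.lower kw) c)) keywords 0]
    rw [zero_add]
    exact hB.symm
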